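-- pv_equiv track=rewrite | github.com/Moutontone/Gods-love-dinosaurs | main.py | activate_rabbit
-- ===== SOURCE A (Python) =====
-- def activate_rabbit(state):
--     ind_rabbit = []
--     N = len(state)
--     for ind, c in enumerate(state):
--         if c == 1:
--             ind_rabbit.append(ind)
--     for ind in ind_rabbit:
--         if state[ind - 1] == 0:
--             state[ind - 1] = 1
--         if state[(ind + 1) % N] == 0:
--             state[(ind + 1) % N] = 1
--     return state
-- ===== SOURCE B (Python) =====
-- def activate_rabbit(state):
--     orig = list(state)
--     N = len(state)
--     for i in range(N):
--         if orig[i] == 0 and (orig[(i - 1) % N] == 1 or orig[(i + 1) % N] == 1):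
--             state[i] = 1
--     return state
-- ===== Notes on version B (the rewrite author's own statement) =====
-- stated objective: simpler
-- what changed: A collects the indices of all 1-cells and then scatters conditional writes to each rabbit's two circular neighbours; B makes one gather pass over every cell, setting it to 1 exactly when it is 0 in a snapshot of the original list and an original neighbour is 1.
import Mathlib
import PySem

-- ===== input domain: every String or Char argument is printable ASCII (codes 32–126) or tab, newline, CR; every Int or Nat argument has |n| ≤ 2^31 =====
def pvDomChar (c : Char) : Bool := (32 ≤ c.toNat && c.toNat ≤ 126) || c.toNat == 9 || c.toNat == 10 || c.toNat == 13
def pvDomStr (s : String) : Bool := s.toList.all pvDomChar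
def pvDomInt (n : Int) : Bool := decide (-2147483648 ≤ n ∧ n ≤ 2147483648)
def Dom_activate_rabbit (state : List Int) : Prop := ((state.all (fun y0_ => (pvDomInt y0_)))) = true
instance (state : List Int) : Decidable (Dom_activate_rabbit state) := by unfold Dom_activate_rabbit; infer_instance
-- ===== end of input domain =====

-- B replaces A's collect-the-rabbits-then-scatter pass by a single gather pass per cell,
-- reading neighbour conditions from a snapshot (objective: simpler). Both Pythons mutate
-- the argument list in place and return it; the equivalence proved here is about the
-- returned value.

-- ===== PORT A =====
def activate_rabbit (state : List Int) : List Int :=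
  let ind_rabbit : List Int :=
    (PySem.List.enumerate state).foldl
      (fun acc p => if p.2 = 1 then acc ++ [p.1] else acc) []
  let N : Int := state.length
  ind_rabbit.foldl
    (fun s ind =>
      let s1 := if PySem.List.pyGetD s (ind - 1) 0 = 0
                then PySem.List.pySetD s (ind - 1) 1 else s
      if PySem.List.pyGetD s1 (PySem.Int.mod (ind + 1) N) 0 = 0
      then PySem.List.pySetD s1 (PySem.Int.mod (ind + 1) N) 1 else s1)
    state

-- ===== PORT B =====
def activate_rabbit_alt (state : List Int) : List Int :=
  let orig := state
  let N : Int := state.length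
  (PySem.List.pyRange 0 N 1).foldl
    (fun s i =>
      if PySem.List.pyGetD orig i 0 = 0 ∧
         (PySem.List.pyGetD orig (PySem.Int.mod (i - 1) N) 0 = 1 ∨
          PySem.List.pyGetD orig (PySem.Int.mod (i + 1) N) 0 = 1)
      then PySem.List.pySetD s i 1 else s)
    state

-- ===== PRECONDITION & SPEC =====
def Spec_activate_rabbit (state : List Int) (out : List Int) : Prop := out = activate_rabbit_alt state
instance (state : List Int) (out : List Int) : Decidable (Spec_activate_rabbit state out) := by unfold Spec_activate_rabbit; infer_instance

-- ===== CLAIM (what is proved, stated in full; the proofs are below) =====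
def Claim_equal_activate_rabbit : Prop := ∀ (state : List Int), Dom_activate_rabbit state → Spec_activate_rabbit state (activate_rabbit state)

-- ===== LEMMAS AND PROOFS =====

/-- Left circular neighbour of cell `j` among `n` cells. -/
def nbL (n j : Nat) : Nat := if j = 0 then n - 1 else j - 1
/-- Right circular neighbour of cell `j` among `n` cells. -/
def nbR (n j : Nat) : Nat := if j + 1 = n then 0 else j + 1

/-- "Set cell `t` to 1 if it is currently 0" — the effect of one write of A. -/
def condSet (s : List Int) (t : Nat) : List Int :=
  if s.getD t 0 = 0 then s.set t 1 else s

lemma nbL_lt {n j : Nat} (h : j < n) : nbL n j < n := by unfold nbL; split_ifs <;> omega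
lemma nbR_lt {n j : Nat} (h : j < n) : nbR n j < n := by unfold nbR; split_ifs <;> omega

lemma nbLR (n i j : Nat) (hi : i < n) (hj : j < n) :
    (j = nbL n i ↔ i = nbR n j) ∧ (j = nbR n i ↔ i = nbL n j) := by
  unfold nbL nbR; split_ifs <;> omega

lemma getD_set (s : List Int) (t j : Nat) (v : Int) :
    (s.set t v).getD j 0 = if j = t ∧ t < s.length then v else s.getD j 0 := by
  rw [List.getD_eq_getElem?_getD, List.getD_eq_getElem?_getD, List.getElem?_set]
  split_ifs with h1 h2 h3 <;> simp_all

lemma modL (n i : Nat) (hi : i < n) :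
    PySem.Int.mod ((i:Int) - 1) n = ((nbL n i : Nat) : Int) := by
  rw [PySem.Int.mod_eq_emod_of_pos (by omega)]
  unfold nbL
  by_cases h0 : i = 0
  · subst h0
    have h1 : (((0:Nat):Int) - 1) % n = ((n:Int) - 1) % n := by
      conv_lhs => rw [show (((0:Nat):Int) - 1) = ((n:Int) - 1) + n * (-1) by push_cast; ring]
      rw [Int.add_mul_emod_self_left]
    rw [h1, Int.emod_eq_of_lt (by omega) (by omega), if_pos rfl]
    omega
  · rw [if_neg h0, Int.emod_eq_of_lt (by omega) (by omega)]
    omega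

lemma modR (n i : Nat) (hi : i < n) :
    PySem.Int.mod ((i:Int) + 1) n = ((nbR n i : Nat) : Int) := by
  rw [PySem.Int.mod_eq_emod_of_pos (by omega)]
  unfold nbR
  by_cases h0 : i + 1 = n
  · rw [if_pos h0]
    have h : ((i:Int) + 1) = (n:Int) := by omega
    rw [h, Int.emod_self]; simp
  · rw [if_neg h0, Int.emod_eq_of_lt (by omega) (by omega)]
    push_cast; omega

lemma pyGetD_subL (s : List Int) (i : Nat) (hi : i < s.length) :
    PySem.List.pyGetD s ((i:Int) - 1) 0 = s.getD (nbL s.length i) 0 := by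
  by_cases h0 : i = 0
  · subst h0
    have hne : s ≠ [] := by intro h; simp [h] at hi
    have e : (((0:Nat):Int) - 1) = (-1 : Int) := by norm_num
    rw [e, PySem.List.pyGetD_neg_one s 0 hne]
    unfold nbL
    rw [if_pos rfl, List.getLast_eq_getElem, List.getD_eq_getElem _ _ (by omega)]
  · have e : ((i:Int) - 1) = ((i - 1 : Nat) : Int) := by omega
    rw [e, PySem.List.pyGetD_natCast]
    unfold nbL; rw [if_neg h0]

lemma pySetD_subL (s : List Int) (i : Nat) (hi : i < s.length) (v : Int) :
    PySem.List.pySetD s ((i:Int) - 1) v = s.set (nbL s.length i) v := by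
  by_cases h0 : i = 0
  · subst h0
    have e : (((0:Nat):Int) - 1) = (-1 : Int) := by norm_num
    rw [e]
    simp only [PySem.List.pySetD, PySem.List.pySet?, PySem.List.pyIdx?]
    unfold nbL
    norm_num
    split_ifs with h <;> simp_all
  · have e : ((i:Int) - 1) = ((i - 1 : Nat) : Int) := by omega
    rw [e, PySem.List.pySetD_natCast]
    unfold nbL; rw [if_neg h0]

/-- Invariant of A's scatter loop: cells originally ≠ 0 are untouched; a cell
originally 0 holds 1 exactly when some already-processed write hit it (`W`). -/
def AInv (orig : List Int) (W : Nat → Prop) (s : List Int) : Prop :=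
  ∀ j, j < orig.length →
    (orig.getD j 0 ≠ 0 → s.getD j 0 = orig.getD j 0) ∧
    (orig.getD j 0 = 0 → (s.getD j 0 = 1 ∧ W j) ∨ (s.getD j 0 = 0 ∧ ¬ W j))

lemma AInv_congr {orig : List Int} {W W' : Nat → Prop} {s : List Int}
    (h : ∀ j, W j ↔ W' j) (hI : AInv orig W s) : AInv orig W' s := by
  intro j hj
  refine ⟨(hI j hj).1, fun h0 => ?_⟩
  rcases (hI j hj).2 h0 with ⟨h1, hw⟩ | ⟨h1, hw⟩
  · exact Or.inl ⟨h1, (h j).1 hw⟩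
  · exact Or.inr ⟨h1, fun hw' => hw ((h j).2 hw')⟩

lemma AInv_condSet {orig : List Int} {W : Nat → Prop} {s : List Int} {t : Nat}
    (ht : t < orig.length) (hs : s.length = orig.length) (hI : AInv orig W s) :
    AInv orig (fun j => W j ∨ j = t) (condSet s t) ∧
      (condSet s t).length = orig.length := by
  constructor
  · intro j hj
    have hIj := hI j hj
    have hts : t < s.length := by omega
    by_cases hw : s.getD t 0 = 0
    · simp only [condSet, if_pos hw, getD_set, hts, and_true]
      by_cases hjt : j = t
      · subst hjt
        exact ⟨fun hne => absurd ((hIj.1 hne).symm.trans hw) hne,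
               fun _ => Or.inl ⟨by simp, Or.inr rfl⟩⟩
      · simp only [if_neg hjt]
        refine ⟨hIj.1, fun h0 => ?_⟩
        rcases hIj.2 h0 with ⟨h1, hw'⟩ | ⟨h1, hw'⟩
        · exact Or.inl ⟨h1, Or.inl hw'⟩
        · exact Or.inr ⟨h1, by rintro (h | rfl); exacts [hw' h, hjt rfl]⟩
    · simp only [condSet, if_neg hw]
      refine ⟨hIj.1, fun h0 => ?_⟩
      by_cases hjt : j = t
      · subst hjt
        rcases hIj.2 h0 with ⟨h1, hw'⟩ | ⟨h1, hw'⟩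
        · exact Or.inl ⟨h1, Or.inl hw'⟩
        · exact absurd h1 hw
      · rcases hIj.2 h0 with ⟨h1, hw'⟩ | ⟨h1, hw'⟩
        · exact Or.inl ⟨h1, Or.inl hw'⟩
        · exact Or.inr ⟨h1, by rintro (h | rfl); exacts [hw' h, hjt rfl]⟩
  · simp only [condSet]; split_ifs <;> simp [hs]

lemma foldA (orig : List Int) :
    ∀ (l : List Nat) (W : Nat → Prop) (s : List Int),
      (∀ i ∈ l, i < orig.length) → s.length = orig.length → AInv orig W s →
      AInv orig
        (fun j => W j ∨ ∃ i ∈ l, j = nbL orig.length i ∨ j = nbR orig.length i)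
        (l.foldl (fun s i => condSet (condSet s (nbL orig.length i)) (nbR orig.length i)) s) ∧
      (l.foldl (fun s i => condSet (condSet s (nbL orig.length i)) (nbR orig.length i)) s).length
        = orig.length := by
  intro l
  induction l with
  | nil =>
    intro W s _ hs hI
    exact ⟨AInv_congr (by simp) hI, hs⟩
  | cons i l ih =>
    intro W s hl hs hI
    have hi : i < orig.length := hl i (List.mem_cons_self ..)
    have h1 := AInv_condSet (nbL_lt hi) hs hI
    have h2 := AInv_condSet (nbR_lt hi) h1.2 h1.1
    have h3 := ih (fun j => (W j ∨ j = nbL orig.length i) ∨ j = nbR orig.length i)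
      _ (fun i' hi' => hl i' (List.mem_cons_of_mem _ hi')) h2.2 h2.1
    simp only [List.foldl_cons]
    exact ⟨AInv_congr (fun j => by simp only [List.mem_cons]; aesop) h3.1, h3.2⟩

lemma foldB (orig : List Int) (C : Nat → Prop) [DecidablePred C] :
    ∀ (l : List Nat) (s : List Int),
      (∀ i ∈ l, i < orig.length) → s.length = orig.length →
      (∀ j, j < orig.length →
        ((l.foldl (fun s i => if C i then s.set i 1 else s) s).getD j 0
          = if j ∈ l ∧ C j then 1 else s.getD j 0)) ∧
      (l.foldl (fun s i => if C i then s.set i 1 else s) s).length = orig.length := by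
  intro l
  induction l with
  | nil => intro s _ hs; exact ⟨fun j _ => by simp, hs⟩
  | cons i l ih =>
    intro s hl hs
    have hi : i < orig.length := hl i (List.mem_cons_self ..)
    have hs' : (if C i then s.set i 1 else s).length = orig.length := by
      split_ifs <;> simp [hs]
    have h := ih (if C i then s.set i 1 else s)
      (fun i' hi' => hl i' (List.mem_cons_of_mem _ hi')) hs'
    refine ⟨fun j hj => ?_, by simpa using h.2⟩
    simp only [List.foldl_cons]
    rw [h.1 j hj]
    by_cases hjl : j ∈ l ∧ C j
    · rw [if_pos hjl, if_pos (by exact ⟨List.mem_cons_of_mem _ hjl.1, hjl.2⟩)]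
    · rw [if_neg hjl]
      by_cases hji : j = i
      · subst hji
        by_cases hc : C j
        · rw [if_pos hc, getD_set, if_pos ⟨rfl, by omega⟩,
              if_pos ⟨List.mem_cons_self .., hc⟩]
        · rw [if_neg hc, if_neg (by rintro ⟨_, h⟩; exact hc h)]
      · have he : (if C i then s.set i 1 else s).getD j 0 = s.getD j 0 := by
          split_ifs with hc
          · rw [getD_set, if_neg (by rintro ⟨h, _⟩; exact hji h)]
          · rfl
        rw [he, if_neg ?_]
        rintro ⟨h, hc⟩
        rcases List.mem_cons.1 h with h | h
        exacts [hji h, hjl ⟨h, hc⟩]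

lemma foldl_append_ite (l : List (Int × Int)) (acc : List Int) :
    l.foldl (fun acc p => if p.2 = 1 then acc ++ [p.1] else acc) acc
      = acc ++ (l.filter (fun p => p.2 == 1)).map Prod.fst := by
  induction l generalizing acc with
  | nil => simp
  | cons p l ih =>
    simp only [List.foldl_cons, List.filter_cons]
    by_cases h : p.2 = 1
    · rw [if_pos h, ih]; simp [h]
    · rw [if_neg h, ih]; simp [h]

lemma foldl_congr_inv {α β : Type} (P : α → Prop) (f g : α → β → α)
    (l : List β) (init : α) (hP : P init)
    (h : ∀ acc x, x ∈ l → P acc → f acc x = g acc x ∧ P (g acc x)) :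
    l.foldl f init = l.foldl g init := by
  induction l generalizing init with
  | nil => rfl
  | cons x l ih =>
    simp only [List.foldl_cons]
    have hx := h init x (List.mem_cons_self ..) hP
    rw [hx.1]
    exact ih _ hx.2 (fun acc y hy hPy => h acc y (List.mem_cons_of_mem _ hy) hPy)

lemma exists_nb_iff (orig : List Int) (j : Nat) (hj : j < orig.length) :
    (∃ i ∈ (List.range orig.length).filter (fun k => orig.getD k 0 == 1),
        j = nbL orig.length i ∨ j = nbR orig.length i)
      ↔ (orig.getD (nbL orig.length j) 0 = 1 ∨ orig.getD (nbR orig.length j) 0 = 1) := by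
  constructor
  · rintro ⟨i, hi, hc⟩
    obtain ⟨hir, hv⟩ := List.mem_filter.1 hi
    have hin : i < orig.length := List.mem_range.1 hir
    have hv1 : orig.getD i 0 = 1 := by simpa using hv
    rcases hc with hc | hc
    · exact Or.inr (by rw [← (nbLR orig.length i j hin hj).1.mp hc]; exact hv1)
    · exact Or.inl (by rw [← (nbLR orig.length i j hin hj).2.mp hc]; exact hv1)
  · rintro (h | h)
    · refine ⟨nbL orig.length j, List.mem_filter.2
        ⟨List.mem_range.2 (nbL_lt hj), by simpa using h⟩, Or.inr ?_⟩
      exact ((nbLR orig.length (nbL orig.length j) j (nbL_lt hj) hj).2).mpr rfl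
    · refine ⟨nbR orig.length j, List.mem_filter.2
        ⟨List.mem_range.2 (nbR_lt hj), by simpa using h⟩, Or.inl ?_⟩
      exact ((nbLR orig.length (nbR orig.length j) j (nbR_lt hj) hj).1).mpr rfl

-- ===== VERDICT (by name: the statement is the Claim_ definition above) =====
lemma length_condSet (s : List Int) (t : Nat) : (condSet s t).length = s.length := by
  unfold condSet; split_ifs <;> simp

lemma Astep_eq (n : Nat) (acc : List Int) (i : Nat) (hi : i < n) (hl : acc.length = n) :
    (let s1 := if PySem.List.pyGetD acc ((i:Int) - 1) 0 = 0
               then PySem.List.pySetD acc ((i:Int) - 1) 1 else acc;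
     if PySem.List.pyGetD s1 (PySem.Int.mod ((i:Int) + 1) (n:Int)) 0 = 0
     then PySem.List.pySetD s1 (PySem.Int.mod ((i:Int) + 1) (n:Int)) 1 else s1)
      = condSet (condSet acc (nbL n i)) (nbR n i) := by
  have hil : i < acc.length := by omega
  have e1 : (if PySem.List.pyGetD acc ((i:Int) - 1) 0 = 0
             then PySem.List.pySetD acc ((i:Int) - 1) 1 else acc) = condSet acc (nbL n i) := by
    rw [pyGetD_subL acc i hil, pySetD_subL acc i hil, hl]; rfl
  dsimp only
  rw [e1, modR n i hi, PySem.List.pyGetD_natCast, PySem.List.pySetD_natCast]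
  rfl

lemma hA_eq (state : List Int) :
    activate_rabbit state
      = ((List.range state.length).filter (fun k => state.getD k 0 == 1)).foldl
          (fun s i => condSet (condSet s (nbL state.length i)) (nbR state.length i)) state := by
  unfold activate_rabbit
  have hen : PySem.List.enumerate state
      = (List.range state.length).map (fun (k : Nat) => ((k : Int), state.getD k 0)) := by
    rw [PySem.List.enumerate_eq_map_pyRange state 0]
    have hlen : PySem.List.len state = ((state.length : Nat) : Int) := by
      simp [PySem.List.len]
    rw [hlen, PySem.List.pyRange_zero_natCast, List.map_map]
    apply List.map_congr_left
    intro k _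
    simp [Function.comp]
  rw [hen, foldl_append_ite, List.filter_map, List.map_map, List.nil_append]
  have hfil : ((List.range state.length).filter
        ((fun (p : Int × Int) => p.2 == 1) ∘ (fun (k : Nat) => ((k : Int), state.getD k 0))))
      = (List.range state.length).filter (fun k => state.getD k 0 == 1) := by
    apply List.filter_congr; intro k _; rfl
  rw [hfil, List.foldl_map]
  apply foldl_congr_inv (fun s => s.length = state.length) _ _ _ _ rfl
  intro acc i hi hP
  have hin : i < state.length := List.mem_range.1 (List.mem_filter.1 hi).1
  constructor
  · exact Astep_eq state.length acc i hin hP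
  · rw [length_condSet, length_condSet]; exact hP

lemma hB_eq (state : List Int) :
    activate_rabbit_alt state
      = (List.range state.length).foldl
          (fun s k => if state.getD k 0 = 0 ∧
              (state.getD (nbL state.length k) 0 = 1 ∨ state.getD (nbR state.length k) 0 = 1)
            then s.set k 1 else s) state := by
  unfold activate_rabbit_alt
  dsimp only
  rw [show ((state.length : Nat) : Int) = ((state.length : Nat) : Int) from rfl,
      PySem.List.pyRange_zero_natCast, List.foldl_map]
  apply PySem.List.foldl_congr_mem
  intro acc k hk
  have hkn : k < state.length := List.mem_range.1 hk
  rw [modL state.length k hkn, modR state.length k hkn]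
  simp only [PySem.List.pyGetD_natCast, PySem.List.pySetD_natCast]

-- ===== VERDICT (by name: the statement is the Claim_ definition above) =====
theorem activate_rabbit_spec : Claim_equal_activate_rabbit := by
  intro state _
  unfold Spec_activate_rabbit
  rw [hA_eq, hB_eq]
  have hrlmem : ∀ i ∈ (List.range state.length).filter (fun k => state.getD k 0 == 1),
      i < state.length := fun i hi => List.mem_range.1 (List.mem_filter.1 hi).1
  have hInv0 : AInv state (fun _ => False) state :=
    fun j hj => ⟨fun _ => rfl, fun h0 => Or.inr ⟨h0, not_false⟩⟩
  have hA := foldA state ((List.range state.length).filter (fun k => state.getD k 0 == 1))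
    (fun _ => False) state hrlmem rfl hInv0
  have hB := foldB state
    (fun k => state.getD k 0 = 0 ∧
      (state.getD (nbL state.length k) 0 = 1 ∨ state.getD (nbR state.length k) 0 = 1))
    (List.range state.length) state (fun i hi => List.mem_range.1 hi) rfl
  simp only [List.mem_range] at hB
  apply List.ext_getElem (by rw [hA.2, hB.2])
  intro j hja hjb
  have hj : j < state.length := by rw [← hA.2]; exact hja
  rw [← List.getD_eq_getElem _ 0 hja, ← List.getD_eq_getElem _ 0 hjb, hB.1 j hj]
  have hAj := hA.1 j hj
  by_cases h0 : state.getD j 0 = 0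
  · rcases hAj.2 h0 with ⟨h1, hw⟩ | ⟨h1, hw⟩
    · have hnb := (exists_nb_iff state j hj).1 (by simpa using hw)
      rw [h1, if_pos ⟨hj, h0, hnb⟩]
    · have hneg : ¬ (j < state.length ∧ state.getD j 0 = 0 ∧
          (state.getD (nbL state.length j) 0 = 1 ∨ state.getD (nbR state.length j) 0 = 1)) := by
        rintro ⟨_, _, hnb⟩
        exact hw (Or.inr ((exists_nb_iff state j hj).2 hnb))
      rw [h1, if_neg hneg, h0]
  · rw [hAj.1 h0, if_neg (by rintro ⟨_, hc, _⟩; exact h0 hc)]
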